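-- pv_equiv track=rewrite | github.com/howard1005/LeetCode | 1717-maximum-score-from-removing-substrings/1717-maximum-score-from-removing-substrings.py | maximumGain
-- ===== SOURCE A (Python) =====
-- def maximumGain(s: str, x: int, y: int) -> int:
--     ans = 0
--
--     def proc1(ss):
--         acnt = ss.count('a')
--         bcnt = ss.count('b')
--         n = 0
--         cnt = 0
--         for c in ss:
--             if c == 'a':
--                 cnt += 1
--             if c == 'b':
--                 if cnt:
--                     cnt -= 1
--                     n += x
--                     acnt -= 1
--                     bcnt -= 1
--         n += min(acnt,bcnt)*y
--         return n
--
--     def proc2(ss):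
--         acnt = ss.count('a')
--         bcnt = ss.count('b')
--         n = 0
--         cnt = 0
--         for c in ss:
--             if c == 'b':
--                 cnt += 1
--             if c == 'a':
--                 if cnt:
--                     cnt -= 1
--                     n += y
--                     acnt -= 1
--                     bcnt -= 1
--         n += min(acnt,bcnt)*x
--         return n
--
--     l = []
--     ss = ''
--     for c in s:
--         if c in 'ab':
--             ss += c
--         else:
--             l.append(ss)
--             ss = ''
--     if ss:
--         l.append(ss)
--
--     for ss in l:
--         ans += max(proc1(ss),proc2(ss))
--
--     return ans
-- ===== SOURCE B (Python) =====
-- def maximumGain(s: str, x: int, y: int) -> int: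
--     # One pass: per a/b-segment keep counts and max prefix excesses; score in closed form.
--     def seg_score(a, b, hb, ha):
--         m = min(a, b)
--         k = b - hb          # "ab" pairs removable by greedy matching
--         j = a - ha          # "ba" pairs removable by greedy matching
--         return max(k * x + (m - k) * y, j * y + (m - j) * x)
--
--     total = 0
--     a = b = hb = ha = 0
--     for c in s:
--         if c == 'a':
--             a += 1
--             ha = max(ha, a - b)
--         elif c == 'b':
--             b += 1
--             hb = max(hb, b - a)
--         else:
--             total += seg_score(a, b, hb, ha)
--             a = b = hb = ha = 0
--     return total + seg_score(a, b, hb, ha)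
-- ===== Notes on version B (the rewrite author's own statement) =====
-- stated objective: simpler
-- what changed: A splits the string into a/b-segments and runs two greedy counter passes (plus count() precomputations) per segment, taking the max; B is one resetting pass that keeps per-segment counts of a and b and the maximum prefix excesses, scoring each segment by a closed formula when it ends.
import Mathlib
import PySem

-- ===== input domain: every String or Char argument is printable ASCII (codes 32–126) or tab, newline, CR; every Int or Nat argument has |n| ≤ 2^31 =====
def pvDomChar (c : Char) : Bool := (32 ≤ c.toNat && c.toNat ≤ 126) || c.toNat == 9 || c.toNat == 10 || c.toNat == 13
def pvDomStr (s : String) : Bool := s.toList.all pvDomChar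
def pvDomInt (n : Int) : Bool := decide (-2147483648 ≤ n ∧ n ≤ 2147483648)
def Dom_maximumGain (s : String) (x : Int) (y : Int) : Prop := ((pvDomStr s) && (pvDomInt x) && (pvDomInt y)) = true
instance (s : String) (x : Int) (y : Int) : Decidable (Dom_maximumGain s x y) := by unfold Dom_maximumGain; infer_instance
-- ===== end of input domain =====

-- B replaces A's two greedy counter passes per segment by a single pass keeping counts and
-- max prefix excesses, scoring each segment in closed form (objective: simpler/alternative).

-- ===== PORT A =====
-- the body of proc1's 'for c in ss' loop ('if cnt:' is cnt ≠ 0)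
def procStep1 (x : Int) (st : Int × Int × Int × Int) (c : Char) : Int × Int × Int × Int :=
  let cnt := if c = 'a' then st.2.1 + 1 else st.2.1
  if c = 'b' then
    (if cnt ≠ 0 then (st.1 + x, cnt - 1, st.2.2.1 - 1, st.2.2.2 - 1)
     else (st.1, cnt, st.2.2.1, st.2.2.2))
  else (st.1, cnt, st.2.2.1, st.2.2.2)

-- proc1: ss.count('…') is PySem.Chars.count on the char list
def proc1 (x y : Int) (ss : List Char) : Int :=
  let acnt : Int := (PySem.Chars.count ss ['a'] : Int)
  let bcnt : Int := (PySem.Chars.count ss ['b'] : Int)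
  let r := ss.foldl (procStep1 x) (0, 0, acnt, bcnt)
  r.1 + min r.2.2.1 r.2.2.2 * y

def procStep2 (y : Int) (st : Int × Int × Int × Int) (c : Char) : Int × Int × Int × Int :=
  let cnt := if c = 'b' then st.2.1 + 1 else st.2.1
  if c = 'a' then
    (if cnt ≠ 0 then (st.1 + y, cnt - 1, st.2.2.1 - 1, st.2.2.2 - 1)
     else (st.1, cnt, st.2.2.1, st.2.2.2))
  else (st.1, cnt, st.2.2.1, st.2.2.2)

def proc2 (x y : Int) (ss : List Char) : Int :=
  let acnt : Int := (PySem.Chars.count ss ['a'] : Int)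
  let bcnt : Int := (PySem.Chars.count ss ['b'] : Int)
  let r := ss.foldl (procStep2 y) (0, 0, acnt, bcnt)
  r.1 + min r.2.2.1 r.2.2.2 * x

-- the segmentation loop: state (l, ss); "c in 'ab'" is c = 'a' or c = 'b'
def segStep (st : List (List Char) × List Char) (c : Char) : List (List Char) × List Char :=
  if c = 'a' || c = 'b' then (st.1, st.2 ++ [c]) else (st.1 ++ [st.2], [])

def maximumGain (s : String) (x : Int) (y : Int) : Int :=
  let r := s.toList.foldl segStep ([], [])
  let l := if r.2 ≠ [] then r.1 ++ [r.2] else r.1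
  l.foldl (fun ans ss => ans + max (proc1 x y ss) (proc2 x y ss)) 0

-- ===== PORT B =====
def segScore (x y a b hb ha : Int) : Int :=
  let m := min a b
  let k := b - hb
  let j := a - ha
  max (k * x + (m - k) * y) (j * y + (m - j) * x)

-- state (total, a, b, hb, ha)
def bStep (x y : Int) (st : Int × Int × Int × Int × Int) (c : Char) : Int × Int × Int × Int × Int :=
  if c = 'a' then (st.1, st.2.1 + 1, st.2.2.1, st.2.2.2.1, max st.2.2.2.2 (st.2.1 + 1 - st.2.2.1))
  else if c = 'b' then (st.1, st.2.1, st.2.2.1 + 1, max st.2.2.2.1 (st.2.2.1 + 1 - st.2.1), st.2.2.2.2)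
  else (st.1 + segScore x y st.2.1 st.2.2.1 st.2.2.2.1 st.2.2.2.2, 0, 0, 0, 0)

def maximumGain_alt (s : String) (x : Int) (y : Int) : Int :=
  let r := s.toList.foldl (bStep x y) (0, 0, 0, 0, 0)
  r.1 + segScore x y r.2.1 r.2.2.1 r.2.2.2.1 r.2.2.2.2

-- ===== PRECONDITION & SPEC =====
def Spec_maximumGain (s : String) (x : Int) (y : Int) (out : Int) : Prop := out = maximumGain_alt s x y
instance (s : String) (x : Int) (y : Int) (out : Int) : Decidable (Spec_maximumGain s x y out) := by unfold Spec_maximumGain; infer_instance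

-- ===== CLAIM (what is proved, stated in full; the proofs are below) =====
def Claim_equal_maximumGain : Prop := ∀ (s : String) (x : Int) (y : Int), Dom_maximumGain s x y → Spec_maximumGain s x y (maximumGain s x y)

-- ===== LEMMAS AND PROOFS =====

-- the list of segments A's segmentation loop produces from accumulated ss and remaining t
def segs : List Char → List Char → List (List Char)
  | ss, [] => if ss = [] then [] else [ss]
  | ss, c :: t => if c = 'a' || c = 'b' then segs (ss ++ [c]) t else ss :: segs [] t

def sumScores (x y : Int) (l : List (List Char)) : Int :=
  l.foldl (fun ans ss => ans + max (proc1 x y ss) (proc2 x y ss)) 0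

-- PySem.Chars.count with a one-char needle is plain character count
theorem count_go_singleton (c : Char) : ∀ (l : List Char) (fuel acc : Nat), l.length ≤ fuel →
    PySem.Chars.count.go [c] fuel l acc = acc + l.count c := by
  intro l
  induction l with
  | nil => intro fuel acc h; cases fuel <;> simp [PySem.Chars.count.go]
  | cons hd t ih =>
    intro fuel acc h
    cases fuel with
    | zero => simp at h
    | succ f =>
      have hf : t.length ≤ f := by simpa using h
      simp only [PySem.Chars.count.go]
      by_cases hc : hd = c
      · simp [List.isPrefixOf, hc, ih f (acc + 1) hf]
        omega
      · simp [List.isPrefixOf, hc, ih f acc hf, Ne.symm hc]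

theorem count_singleton (ss : List Char) (c : Char) :
    PySem.Chars.count ss [c] = ss.count c := by
  simpa using count_go_singleton c ss ss.length 0 ss.length.le_refl

-- A's segmentation fold (plus the final non-empty append) produces exactly segs ss t
theorem seg_fold : ∀ (t : List Char) (l : List (List Char)) (ss : List Char),
    (if (t.foldl segStep (l, ss)).2 ≠ [] then (t.foldl segStep (l, ss)).1 ++ [(t.foldl segStep (l, ss)).2]
     else (t.foldl segStep (l, ss)).1) = l ++ segs ss t := by
  intro t
  induction t with
  | nil =>
    intro l ss
    by_cases h : ss = [] <;> simp [segs, h]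
  | cons c t ih =>
    intro l ss
    by_cases hab : c = 'a' ∨ c = 'b'
    · have hc : (c = 'a' || c = 'b') = true := by rcases hab with h | h <;> simp [h]
      simp only [List.foldl_cons, segStep, hc, segs]
      simpa using ih l (ss ++ [c])
    · have hc : (c = 'a' || c = 'b') = false := by
        push Not at hab; simp [hab.1, hab.2]
      simp only [List.foldl_cons, segStep, hc, segs]
      simpa [List.append_assoc] using ih (l ++ [ss]) []

-- shifting the accumulator of the score-summing fold
theorem sumScores_shift (x y : Int) (l : List (List Char)) (a : Int) :
    l.foldl (fun ans ss => ans + max (proc1 x y ss) (proc2 x y ss)) a = a + sumScores x y l := by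
  rw [PySem.List.foldl_add, sumScores, PySem.List.foldl_add]; ring

-- Bisimulation on one a/b-segment: B's single pass (counts a b, max prefix excesses hb ha)
-- determines both of A's greedy counter loops; k = b' - hb' (resp. j = a' - ha') is the number
-- of matches proc1 (resp. proc2) makes, and the counters keep their invariants.
theorem core (x y : Int) : ∀ (t : List Char), (∀ c ∈ t, c = 'a' ∨ c = 'b') →
    ∀ (total a b hb ha : Int), b - a ≤ hb → 0 ≤ hb → a - b ≤ ha → 0 ≤ ha →
    (t.foldl (bStep x y) (total, a, b, hb, ha)).1 = total ∧
    (t.foldl (bStep x y) (total, a, b, hb, ha)).2.1 = a + (t.count 'a' : Int) ∧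
    (t.foldl (bStep x y) (total, a, b, hb, ha)).2.2.1 = b + (t.count 'b' : Int) ∧
    ((t.foldl (bStep x y) (total, a, b, hb, ha)).2.2.1 - (t.foldl (bStep x y) (total, a, b, hb, ha)).2.1
       ≤ (t.foldl (bStep x y) (total, a, b, hb, ha)).2.2.2.1 ∧
     0 ≤ (t.foldl (bStep x y) (total, a, b, hb, ha)).2.2.2.1) ∧
    ((t.foldl (bStep x y) (total, a, b, hb, ha)).2.1 - (t.foldl (bStep x y) (total, a, b, hb, ha)).2.2.1
       ≤ (t.foldl (bStep x y) (total, a, b, hb, ha)).2.2.2.2 ∧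
     0 ≤ (t.foldl (bStep x y) (total, a, b, hb, ha)).2.2.2.2) ∧
    (∀ n ac bc, t.foldl (procStep1 x) (n, a - b + hb, ac, bc) =
       (n + x * (((t.foldl (bStep x y) (total, a, b, hb, ha)).2.2.1 - (t.foldl (bStep x y) (total, a, b, hb, ha)).2.2.2.1) - (b - hb)),
        (t.foldl (bStep x y) (total, a, b, hb, ha)).2.1 - (t.foldl (bStep x y) (total, a, b, hb, ha)).2.2.1 + (t.foldl (bStep x y) (total, a, b, hb, ha)).2.2.2.1,
        ac - (((t.foldl (bStep x y) (total, a, b, hb, ha)).2.2.1 - (t.foldl (bStep x y) (total, a, b, hb, ha)).2.2.2.1) - (b - hb)),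
        bc - (((t.foldl (bStep x y) (total, a, b, hb, ha)).2.2.1 - (t.foldl (bStep x y) (total, a, b, hb, ha)).2.2.2.1) - (b - hb)))) ∧
    (∀ n ac bc, t.foldl (procStep2 y) (n, b - a + ha, ac, bc) =
       (n + y * (((t.foldl (bStep x y) (total, a, b, hb, ha)).2.1 - (t.foldl (bStep x y) (total, a, b, hb, ha)).2.2.2.2) - (a - ha)),
        (t.foldl (bStep x y) (total, a, b, hb, ha)).2.2.1 - (t.foldl (bStep x y) (total, a, b, hb, ha)).2.1 + (t.foldl (bStep x y) (total, a, b, hb, ha)).2.2.2.2,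
        ac - (((t.foldl (bStep x y) (total, a, b, hb, ha)).2.1 - (t.foldl (bStep x y) (total, a, b, hb, ha)).2.2.2.2) - (a - ha)),
        bc - (((t.foldl (bStep x y) (total, a, b, hb, ha)).2.1 - (t.foldl (bStep x y) (total, a, b, hb, ha)).2.2.2.2) - (a - ha)))) := by
  intro t
  induction t with
  | nil =>
    intro _ total a b hb ha h1 h2 h3 h4
    refine ⟨rfl, by simp, by simp, ⟨h1, h2⟩, ⟨h3, h4⟩, ?_, ?_⟩ <;> (intro n ac bc; simp)
  | cons c t ih =>
    intro hmem total a b hb ha h1 h2 h3 h4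
    have hmt : ∀ c ∈ t, c = 'a' ∨ c = 'b' := fun d hd => hmem d (List.mem_cons_of_mem c hd)
    rcases hmem c List.mem_cons_self with hca | hcb
    · subst hca
      simp only [List.foldl_cons]
      have hstep : bStep x y (total, a, b, hb, ha) 'a' = (total, a + 1, b, hb, max ha (a + 1 - b)) := by
        simp [bStep]
      rw [hstep]
      obtain ⟨i1, i2, i3, i4, i5, i6, i7⟩ := ih hmt total (a + 1) b hb (max ha (a + 1 - b))
        (by omega) h2 (le_max_right _ _) (le_trans h4 (le_max_left _ _))
      refine ⟨i1, ?_, ?_, i4, i5, ?_, ?_⟩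
      · rw [i2]; simp; ring
      · rw [i3]; simp
      · intro n ac bc
        have hp : procStep1 x (n, a - b + hb, ac, bc) 'a' = (n, a + 1 - b + hb, ac, bc) := by
          simp [procStep1, Prod.ext_iff]; omega
        rw [hp]; exact i6 n ac bc
      · intro n ac bc
        have hp : procStep2 y (n, b - a + ha, ac, bc) 'a' =
            (if b - a + ha ≠ 0 then (n + y, b - a + ha - 1, ac - 1, bc - 1) else (n, b - a + ha, ac, bc)) := by
          simp [procStep2]
        rw [hp]
        by_cases hz : b - a + ha = 0
        · have hm : max ha (a + 1 - b) = ha + 1 := by omega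
          have i7' := i7 n ac bc
          rw [hm] at i7'
          rw [hm, if_neg (by omega), show b - a + ha = b - (a + 1) + (ha + 1) from by ring, i7']
          simp only [Prod.mk.injEq]
          refine ⟨?_, ?_, ?_, ?_⟩ <;> first | trivial | ring
        · have hm : max ha (a + 1 - b) = ha := by omega
          have i7' := i7 (n + y) (ac - 1) (bc - 1)
          rw [hm] at i7'
          rw [hm, if_pos hz, show b - a + ha - 1 = b - (a + 1) + ha from by ring, i7']
          simp only [Prod.mk.injEq]
          refine ⟨?_, ?_, ?_, ?_⟩ <;> first | trivial | ring
    · subst hcb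
      simp only [List.foldl_cons]
      have hstep : bStep x y (total, a, b, hb, ha) 'b' = (total, a, b + 1, max hb (b + 1 - a), ha) := by
        simp [bStep]
      rw [hstep]
      obtain ⟨i1, i2, i3, i4, i5, i6, i7⟩ := ih hmt total a (b + 1) (max hb (b + 1 - a)) ha
        (le_max_right _ _) (le_trans h2 (le_max_left _ _)) (by omega) h4
      refine ⟨i1, ?_, ?_, i4, i5, ?_, ?_⟩
      · rw [i2]; simp
      · rw [i3]; simp; ring
      · intro n ac bc
        have hp : procStep1 x (n, a - b + hb, ac, bc) 'b' =
            (if a - b + hb ≠ 0 then (n + x, a - b + hb - 1, ac - 1, bc - 1) else (n, a - b + hb, ac, bc)) := by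
          simp [procStep1]
        rw [hp]
        by_cases hz : a - b + hb = 0
        · have hm : max hb (b + 1 - a) = hb + 1 := by omega
          have i6' := i6 n ac bc
          rw [hm] at i6'
          rw [hm, if_neg (by omega), show a - b + hb = a - (b + 1) + (hb + 1) from by ring, i6']
          simp only [Prod.mk.injEq]
          refine ⟨?_, ?_, ?_, ?_⟩ <;> first | trivial | ring
        · have hm : max hb (b + 1 - a) = hb := by omega
          have i6' := i6 (n + x) (ac - 1) (bc - 1)
          rw [hm] at i6'
          rw [hm, if_pos hz, show a - b + hb - 1 = a - (b + 1) + hb from by ring, i6']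
          simp only [Prod.mk.injEq]
          refine ⟨?_, ?_, ?_, ?_⟩ <;> first | trivial | ring
      · intro n ac bc
        have hp : procStep2 y (n, b - a + ha, ac, bc) 'b' = (n, b + 1 - a + ha, ac, bc) := by
          simp [procStep2, Prod.ext_iff]; omega
        rw [hp]; exact i7 n ac bc

-- On one a/b-only segment, A's greedy passes equal B's closed forms
theorem proc1_eq (x y : Int) (ss : List Char) (hab : ∀ c ∈ ss, c = 'a' ∨ c = 'b') :
    proc1 x y ss = ((ss.foldl (bStep x y) (0, 0, 0, 0, 0)).2.2.1 - (ss.foldl (bStep x y) (0, 0, 0, 0, 0)).2.2.2.1) * x + (min (ss.foldl (bStep x y) (0, 0, 0, 0, 0)).2.1 (ss.foldl (bStep x y) (0, 0, 0, 0, 0)).2.2.1 - ((ss.foldl (bStep x y) (0, 0, 0, 0, 0)).2.2.1 - (ss.foldl (bStep x y) (0, 0, 0, 0, 0)).2.2.2.1)) * y := by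
  obtain ⟨i1, i2, i3, ⟨j1, j2⟩, ⟨j3, j4⟩, f1, f2⟩ :=
    core x y ss hab 0 0 0 0 0 (by omega) le_rfl (by omega) le_rfl
  have f1' := f1 0 ((ss.count 'a' : Int)) ((ss.count 'b' : Int))
  norm_num at f1' i2 i3
  simp only [proc1, count_singleton, f1']
  rw [← i2, ← i3]
  have hmin : min ((ss.foldl (bStep x y) (0, 0, 0, 0, 0)).2.1 - ((ss.foldl (bStep x y) (0, 0, 0, 0, 0)).2.2.1 - (ss.foldl (bStep x y) (0, 0, 0, 0, 0)).2.2.2.1)) ((ss.foldl (bStep x y) (0, 0, 0, 0, 0)).2.2.1 - ((ss.foldl (bStep x y) (0, 0, 0, 0, 0)).2.2.1 - (ss.foldl (bStep x y) (0, 0, 0, 0, 0)).2.2.2.1)) = min (ss.foldl (bStep x y) (0, 0, 0, 0, 0)).2.1 (ss.foldl (bStep x y) (0, 0, 0, 0, 0)).2.2.1 - ((ss.foldl (bStep x y) (0, 0, 0, 0, 0)).2.2.1 - (ss.foldl (bStep x y) (0, 0, 0, 0, 0)).2.2.2.1) := by omega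
  rw [hmin]; ring

theorem proc2_eq (x y : Int) (ss : List Char) (hab : ∀ c ∈ ss, c = 'a' ∨ c = 'b') :
    proc2 x y ss = ((ss.foldl (bStep x y) (0, 0, 0, 0, 0)).2.1 - (ss.foldl (bStep x y) (0, 0, 0, 0, 0)).2.2.2.2) * y + (min (ss.foldl (bStep x y) (0, 0, 0, 0, 0)).2.1 (ss.foldl (bStep x y) (0, 0, 0, 0, 0)).2.2.1 - ((ss.foldl (bStep x y) (0, 0, 0, 0, 0)).2.1 - (ss.foldl (bStep x y) (0, 0, 0, 0, 0)).2.2.2.2)) * x := by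
  obtain ⟨i1, i2, i3, ⟨j1, j2⟩, ⟨j3, j4⟩, f1, f2⟩ :=
    core x y ss hab 0 0 0 0 0 (by omega) le_rfl (by omega) le_rfl
  have f2' := f2 0 ((ss.count 'a' : Int)) ((ss.count 'b' : Int))
  norm_num at f2' i2 i3
  simp only [proc2, count_singleton, f2']
  rw [← i2, ← i3]
  have hmin : min ((ss.foldl (bStep x y) (0, 0, 0, 0, 0)).2.1 - ((ss.foldl (bStep x y) (0, 0, 0, 0, 0)).2.1 - (ss.foldl (bStep x y) (0, 0, 0, 0, 0)).2.2.2.2)) ((ss.foldl (bStep x y) (0, 0, 0, 0, 0)).2.2.1 - ((ss.foldl (bStep x y) (0, 0, 0, 0, 0)).2.1 - (ss.foldl (bStep x y) (0, 0, 0, 0, 0)).2.2.2.2)) = min (ss.foldl (bStep x y) (0, 0, 0, 0, 0)).2.1 (ss.foldl (bStep x y) (0, 0, 0, 0, 0)).2.2.1 - ((ss.foldl (bStep x y) (0, 0, 0, 0, 0)).2.1 - (ss.foldl (bStep x y) (0, 0, 0, 0, 0)).2.2.2.2) := by omega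
  rw [hmin]; ring

theorem score_eq (x y : Int) (ss : List Char) (hab : ∀ c ∈ ss, c = 'a' ∨ c = 'b') :
    max (proc1 x y ss) (proc2 x y ss) = segScore x y (ss.foldl (bStep x y) (0, 0, 0, 0, 0)).2.1 (ss.foldl (bStep x y) (0, 0, 0, 0, 0)).2.2.1 (ss.foldl (bStep x y) (0, 0, 0, 0, 0)).2.2.2.1 (ss.foldl (bStep x y) (0, 0, 0, 0, 0)).2.2.2.2 := by
  rw [proc1_eq x y ss hab, proc2_eq x y ss hab]; rfl

theorem sumScores_cons (x y : Int) (ss : List Char) (l : List (List Char)) :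
    sumScores x y (ss :: l) = max (proc1 x y ss) (proc2 x y ss) + sumScores x y l := by
  show l.foldl _ (0 + max (proc1 x y ss) (proc2 x y ss)) = _
  rw [sumScores_shift]; ring

-- B's single resetting pass computes the sum of A's per-segment scores
theorem B_main (x y : Int) : ∀ (t : List Char), ∀ (ss : List Char) (total a b hb ha : Int),
    (∀ c ∈ ss, c = 'a' ∨ c = 'b') →
    ss.foldl (bStep x y) (0, 0, 0, 0, 0) = (0, a, b, hb, ha) →
    (t.foldl (bStep x y) (total, a, b, hb, ha)).1
      + segScore x y (t.foldl (bStep x y) (total, a, b, hb, ha)).2.1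
          (t.foldl (bStep x y) (total, a, b, hb, ha)).2.2.1
          (t.foldl (bStep x y) (total, a, b, hb, ha)).2.2.2.1
          (t.foldl (bStep x y) (total, a, b, hb, ha)).2.2.2.2
      = total + sumScores x y (segs ss t) := by
  intro t
  induction t with
  | nil =>
    intro ss total a b hb ha hab hss
    simp only [List.foldl_nil]
    by_cases h : ss = []
    · subst h
      simp only [List.foldl_nil] at hss
      obtain ⟨h0, h1, h2, h3, h4⟩ : (0 : Int) = 0 ∧ (0 : Int) = a ∧ (0 : Int) = b ∧ (0 : Int) = hb ∧ (0 : Int) = ha := by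
        simpa [Prod.ext_iff] using hss
      subst h1; subst h2; subst h3; subst h4
      simp [segs, sumScores, segScore]
    · simp only [segs, if_neg h]
      rw [sumScores_cons, score_eq x y ss hab, hss]
      simp [sumScores]
  | cons c t ih =>
    intro ss total a b hb ha hab hss
    by_cases hca : c = 'a'
    · subst hca
      simp only [List.foldl_cons]
      rw [show bStep x y (total, a, b, hb, ha) 'a' = (total, a + 1, b, hb, max ha (a + 1 - b)) from by simp [bStep]]
      rw [ih (ss ++ ['a']) total (a + 1) b hb (max ha (a + 1 - b))
        (by intro d hd; rcases List.mem_append.mp hd with h | h; exact hab d h; left; simpa using h)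
        (by rw [List.foldl_append, hss]; simp [bStep])]
      simp [segs]
    · by_cases hcb : c = 'b'
      · subst hcb
        simp only [List.foldl_cons]
        rw [show bStep x y (total, a, b, hb, ha) 'b' = (total, a, b + 1, max hb (b + 1 - a), ha) from by simp [bStep]]
        rw [ih (ss ++ ['b']) total a (b + 1) (max hb (b + 1 - a)) ha
          (by intro d hd; rcases List.mem_append.mp hd with h | h; exact hab d h; right; simpa using h)
          (by rw [List.foldl_append, hss]; simp [bStep])]
        simp [segs]
      · simp only [List.foldl_cons]
        rw [show bStep x y (total, a, b, hb, ha) c = (total + segScore x y a b hb ha, 0, 0, 0, 0) from by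
          simp [bStep, hca, hcb]]
        rw [ih [] (total + segScore x y a b hb ha) 0 0 0 0 (by simp) rfl]
        rw [show segs ss (c :: t) = ss :: segs [] t from by simp [segs, hca, hcb]]
        rw [sumScores_cons, score_eq x y ss hab, hss]
        ring

-- ===== VERDICT (by name: the statement is the Claim_ definition above) =====
theorem maximumGain_spec : Claim_equal_maximumGain := by
  intro s x y _
  show maximumGain s x y = maximumGain_alt s x y
  have hA := seg_fold s.toList [] []
  simp only [List.nil_append] at hA
  have hB := B_main x y s.toList [] 0 0 0 0 0 (by simp) rfl
  show (if (s.toList.foldl segStep ([], [])).2 ≠ [] then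
          (s.toList.foldl segStep ([], [])).1 ++ [(s.toList.foldl segStep ([], [])).2]
        else (s.toList.foldl segStep ([], [])).1).foldl
          (fun ans ss => ans + max (proc1 x y ss) (proc2 x y ss)) 0 = _
  rw [hA]
  show sumScores x y (segs [] s.toList)
      = (s.toList.foldl (bStep x y) (0, 0, 0, 0, 0)).1 + segScore x y (s.toList.foldl (bStep x y) (0, 0, 0, 0, 0)).2.1 (s.toList.foldl (bStep x y) (0, 0, 0, 0, 0)).2.2.1 (s.toList.foldl (bStep x y) (0, 0, 0, 0, 0)).2.2.2.1 (s.toList.foldl (bStep x y) (0, 0, 0, 0, 0)).2.2.2.2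
  rw [hB]
  ring
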